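-- pv_equiv track=rewrite | github.com/benquick123/code-profiling | code/batch-1/vse-naloge-brez-testov/DN6-M-162.py | besedilo
-- ===== SOURCE A (Python) =====
-- def besedilo(tvit):
--     i = 0
--     tab1 = []
--     tab2 = list(tvit)
--     while i < len(tab2):
--         if tab2[i] == ":":
--             i=i+2
--             while i < len(tab2):
--                 tab1.append(tab2[i])
--                 i=i+1
--         i=i+1
--     besedilo = "".join(tab1)
--     return besedilo
-- ===== SOURCE B (Python) =====
-- def besedilo(tvit):
--     idx = tvit.find(":")
--     return "" if idx == -1 else tvit[idx + 2:]
-- ===== Notes on version B (the rewrite author's own statement) =====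
-- stated objective: idiomatic
-- what changed: Replaces the index-driven outer/inner while loops with a character accumulator list and join by a single str.find for the first colon followed by one slice tvit[idx+2:].
import Mathlib
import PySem

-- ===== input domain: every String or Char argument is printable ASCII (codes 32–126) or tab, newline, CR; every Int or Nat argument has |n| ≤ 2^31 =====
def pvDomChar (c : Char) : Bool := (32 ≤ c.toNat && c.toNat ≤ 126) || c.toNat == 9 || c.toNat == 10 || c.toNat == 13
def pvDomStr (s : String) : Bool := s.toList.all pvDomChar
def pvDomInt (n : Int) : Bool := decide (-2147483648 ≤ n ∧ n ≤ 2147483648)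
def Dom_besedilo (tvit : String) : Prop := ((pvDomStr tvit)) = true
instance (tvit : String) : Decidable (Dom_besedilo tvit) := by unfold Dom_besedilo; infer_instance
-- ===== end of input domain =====

-- B replaces A's two index-driven while loops and character accumulator with one find plus one slice (idiomatic).

-- ===== PORT A =====
-- inner 'while i < len(tab2): tab1.append(tab2[i]); i += 1' — fuel makes the loop structural;
-- fuel ≥ len(tab2)+1 at the call site, so the 0 case is never the one that stops the real loop
def besediloInner (tab2 : List Char) : Nat → Nat → List Char → Nat × List Char
  | 0, i, tab1 => (i, tab1)
  | f + 1, i, tab1 =>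
    if h : i < tab2.length then besediloInner tab2 f (i + 1) (tab1 ++ [tab2[i]])
    else (i, tab1)

-- outer 'while i < len(tab2): if tab2[i] == ":": i += 2; <inner>; i += 1'
def besediloOuter (tab2 : List Char) : Nat → Nat → List Char → List Char
  | 0, _, tab1 => tab1
  | f + 1, i, tab1 =>
    if h : i < tab2.length then
      if tab2[i] = ':' then
        let r := besediloInner tab2 (tab2.length + 1) (i + 2) tab1
        besediloOuter tab2 f (r.1 + 1) r.2
      else besediloOuter tab2 f (i + 1) tab1
    else tab1

def besedilo (tvit : String) : String :=
  String.ofList (besediloOuter tvit.toList (tvit.toList.length + 1) 0 [])   -- "".join of the collected characters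

-- ===== PORT B =====
def besedilo_alt (tvit : String) : String :=
  let idx : Int := PySem.Str.find tvit ":"
  if idx = -1 then "" else PySem.Str.slice tvit (some (idx + 2)) none

-- ===== PRECONDITION & SPEC =====
def Spec_besedilo (tvit : String) (out : String) : Prop := out = besedilo_alt tvit
instance (tvit : String) (out : String) : Decidable (Spec_besedilo tvit out) := by unfold Spec_besedilo; infer_instance

-- ===== CLAIM (what is proved, stated in full; the proofs are below) =====
def Claim_equal_besedilo : Prop := ∀ (tvit : String), Dom_besedilo tvit → Spec_besedilo tvit (besedilo tvit)

-- ===== LEMMAS AND PROOFS =====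

theorem besediloInner_eq (tab2 : List Char) (f i : Nat) (tab1 : List Char)
    (hf : tab2.length ≤ i + f) :
    besediloInner tab2 f i tab1 = (max i tab2.length, tab1 ++ tab2.drop i) := by
  induction f generalizing i tab1 with
  | zero =>
      have h2 : tab2.length ≤ i := by omega
      rw [besediloInner, List.drop_of_length_le h2, List.append_nil, Nat.max_eq_left h2]
  | succ f ih =>
      rw [besediloInner]
      split
      · next h =>
        rw [ih (i + 1) _ (by omega)]
        have hd : tab2.drop i = tab2[i] :: tab2.drop (i + 1) := List.drop_eq_getElem_cons h
        rw [hd, Prod.mk.injEq]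
        exact ⟨by omega, by simp⟩
      · next h =>
        have h2 : tab2.length ≤ i := by omega
        rw [List.drop_of_length_le h2, List.append_nil, Nat.max_eq_left h2]

theorem besediloOuter_no_colon (tab2 : List Char) (f i : Nat) (tab1 : List Char)
    (h : ∀ j, i ≤ j → (hj : j < tab2.length) → tab2[j] ≠ ':') :
    besediloOuter tab2 f i tab1 = tab1 := by
  induction f generalizing i tab1 with
  | zero => rfl
  | succ f ih =>
      rw [besediloOuter]
      split
      · next hi =>
        rw [if_neg (h i le_rfl hi)]
        exact ih (i + 1) tab1 (fun j hj hjl => h j (by omega) hjl)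
      · rfl

theorem besediloOuter_colon (tab2 : List Char) (j : Nat) (hjl : j < tab2.length)
    (hj : tab2[j] = ':') :
    ∀ f i tab1, j < i + f → i ≤ j →
      (∀ k, i ≤ k → (hk : k < tab2.length) → k < j → tab2[k] ≠ ':') →
      besediloOuter tab2 f i tab1 = tab1 ++ tab2.drop (j + 2) := by
  intro f
  induction f with
  | zero => intro i tab1 hf hij _; omega
  | succ f ih =>
      intro i tab1 hf hij hmin
      have hil : i < tab2.length := by omega
      rw [besediloOuter, dif_pos hil]
      by_cases hc : i = j
      · subst hc
        rw [if_pos hj, besediloInner_eq tab2 _ _ _ (by omega)]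
        cases f with
        | zero => rfl
        | succ f' =>
            rw [besediloOuter]
            rw [dif_neg (by simp; omega)]
      · rw [if_neg (hmin i le_rfl hil (by omega))]
        exact ih (i + 1) tab1 (by omega) (by omega)
          (fun k hk hkl hkj => hmin k (by omega) hkl hkj)

-- [':'] is a prefix of l.drop j  ↔  l[j]? = some ':'
theorem singleton_prefix_drop (l : List Char) (j : Nat) :
    ([':'] <+: l.drop j) ↔ l[j]? = some ':' := by
  rcases hd : l.drop j with _ | ⟨c, t⟩ <;> rw [← List.head?_drop, hd]
  · simp
  · constructor
    · rintro ⟨t', ht⟩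
      simp only [List.singleton_append, List.cons.injEq] at ht
      simp [ht.1.symm]
    · intro h
      simp only [List.head?_cons, Option.some.injEq] at h
      exact ⟨t, by simp [h]⟩

theorem besedilo_eq_alt (tvit : String) : besedilo tvit = besedilo_alt tvit := by
  unfold besedilo besedilo_alt
  set l := tvit.toList with hl
  by_cases h : PySem.Str.find tvit ":" = -1
  · have hno : ¬ ([':'] <:+: l) := by
      have := (PySem.Str.find_eq_neg_one_iff (s := tvit) (sub := ":")).mp h
      simpa using this
    simp only [h, if_pos rfl]
    have : besediloOuter l (l.length + 1) 0 [] = [] := by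
      apply besediloOuter_no_colon
      intro j _ hjl hc
      have h2 : (':' : Char) :: l.drop (j + 1) = l.drop j := by
        rw [← hc]; exact List.getElem_cons_drop hjl
      exact hno ⟨l.take j, l.drop (j + 1), by
        rw [List.append_assoc, List.singleton_append, h2, List.take_append_drop]⟩
    rw [this]; rfl
  · simp only [h, if_neg h]
    have hnn : (0:Int) ≤ PySem.Str.find tvit ":" := by
      have := PySem.Chars.neg_one_le_find (s := tvit.toList) (sub := ":".toList)
      have he : PySem.Str.find tvit ":" = PySem.Chars.find tvit.toList ":".toList := by
        simp [PySem.Str.find_eq]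
      omega
    set jI : Int := PySem.Str.find tvit ":" with hj
    set j : Nat := jI.toNat with hjn
    have hfe : PySem.Chars.find l [':'] = jI := by
      have : PySem.Str.find tvit ":" = PySem.Chars.find tvit.toList ":".toList := by
        simp [PySem.Str.find_eq]
      rw [hj, this]; rfl
    have hspec := PySem.Chars.find_spec (s := l) (sub := [':']) (by rw [hfe]; exact hnn)
    rw [hfe] at hspec
    obtain ⟨hpre, hmin⟩ := hspec
    have hget : l[j]? = some ':' := (singleton_prefix_drop l j).mp hpre
    have hjl : j < l.length := by
      rcases List.getElem?_eq_some_iff.mp hget with ⟨hlt, _⟩; exact hlt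
    have hjc : l[j] = ':' := by
      rcases List.getElem?_eq_some_iff.mp hget with ⟨_, hv⟩; exact hv
    have houter : besediloOuter l (l.length + 1) 0 [] = l.drop (j + 2) := by
      have := besediloOuter_colon l j hjl hjc (l.length + 1) 0 [] (by omega) (by omega)
        (fun k _ hkl hkj hc => hmin k hkj ((singleton_prefix_drop l k).mpr
          (by simp [List.getElem?_eq_getElem hkl, hc])))
      simpa using this
    rw [houter]
    -- B side: slice tvit (jI+2) none = drop (j+2)
    have hsl : (PySem.Str.slice tvit (some (jI + 2)) none).toList = l.drop (j + 2) := by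
      rw [PySem.Str.toList_slice]
      rw [PySem.Chars.slice_eq_listSlice]
      rw [PySem.List.slice_from (xs := l) (a := jI + 2) (by omega)]
      congr 1
      omega
    apply String.toList_injective
    simp only [h, if_neg, hsl, ite_false]
    simp

-- ===== VERDICT (by name: the statement is the Claim_ definition above) =====
theorem besedilo_spec : Claim_equal_besedilo := by
  intro tvit _
  exact besedilo_eq_alt tvit
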